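-- pv_equiv track=rewrite | github.com/LyttonFeng/pinchbench-skill | rl/data_construction/collect_task18_harness_focused_dpo.py | _make_prompt_variants
-- ===== SOURCE A (Python) =====
-- def _make_prompt_variants(base_prompt: str, target_count: int) -> list[str]:
--     intros = [
--         "Please analyze the files below and write the required report.",
--         "I need a clean analysis of the two data files in the workspace.",
--         "Analyze these workspace data files and produce the requested report.",
--         "Please read both files carefully and write a summary report.",
--         "Use the provided files to generate the requested markdown summary.",
--     ]
--     nudges = [
--         "Do not guess spreadsheet contents without reading the workbook structure.",
--         "Make sure the Excel workbook is actually parsed before summarizing it.",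
--         "The workbook has multiple sheets, so inspect it structurally before reporting numbers.",
--         "Be careful not to treat the Excel workbook as plain text.",
--         "Use the available tools to inspect the real file contents before writing conclusions.",
--     ]
--     closers = [
--         "Keep the report concise but correct.",
--         "Accuracy matters more than speed.",
--         "Do the real computation before writing `data_summary.md`.",
--         "Use the workspace files directly; do not make assumptions.",
--         "Write the final report only after the required analysis is complete.",
--     ]
--
--     prompts: list[str] = []
--     for i in range(target_count):
--         intro = intros[i % len(intros)]
--         nudge = nudges[(i // len(intros)) % len(nudges)]
--         closer = closers[(i // (len(intros) * len(nudges))) % len(closers)]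
--         prompts.append(f"{intro}\n\n{base_prompt}\n\nNote: {nudge}\n{closer}")
--     return prompts[:target_count]
-- ===== SOURCE B (Python) =====
-- def _make_prompt_variants(base_prompt: str, target_count: int) -> list[str]:
--     intros = [
--         "Please analyze the files below and write the required report.",
--         "I need a clean analysis of the two data files in the workspace.",
--         "Analyze these workspace data files and produce the requested report.",
--         "Please read both files carefully and write a summary report.",
--         "Use the provided files to generate the requested markdown summary.",
--     ]
--     nudges = [
--         "Do not guess spreadsheet contents without reading the workbook structure.",
--         "Make sure the Excel workbook is actually parsed before summarizing it.",
--         "The workbook has multiple sheets, so inspect it structurally before reporting numbers.",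
--         "Be careful not to treat the Excel workbook as plain text.",
--         "Use the available tools to inspect the real file contents before writing conclusions.",
--     ]
--     closers = [
--         "Keep the report concise but correct.",
--         "Accuracy matters more than speed.",
--         "Do the real computation before writing `data_summary.md`.",
--         "Use the workspace files directly; do not make assumptions.",
--         "Write the final report only after the required analysis is complete.",
--     ]
--     # Format one full cycle of all combinations (intro varies fastest), then
--     # tile it with list repetition and truncate: no per-index arithmetic at all.
--     block = [
--         f"{intro}\n\n{base_prompt}\n\nNote: {nudge}\n{closer}"
--         for closer in closers for nudge in nudges for intro in intros
--     ]
--     if target_count <= 0: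
--         return []
--     reps = -(-target_count // len(block))  # ceiling division
--     return (block * reps)[:target_count]
-- ===== Notes on version B (the rewrite author's own statement) =====
-- stated objective: alternative
-- what changed: B formats the full 125-prompt cycle once via a triple comprehension (intro fastest), then produces the output by whole-list repetition (block * ceil(n/125)) truncated to target_count, instead of A's per-iteration mod/div index arithmetic into the three template lists.
import Mathlib
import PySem

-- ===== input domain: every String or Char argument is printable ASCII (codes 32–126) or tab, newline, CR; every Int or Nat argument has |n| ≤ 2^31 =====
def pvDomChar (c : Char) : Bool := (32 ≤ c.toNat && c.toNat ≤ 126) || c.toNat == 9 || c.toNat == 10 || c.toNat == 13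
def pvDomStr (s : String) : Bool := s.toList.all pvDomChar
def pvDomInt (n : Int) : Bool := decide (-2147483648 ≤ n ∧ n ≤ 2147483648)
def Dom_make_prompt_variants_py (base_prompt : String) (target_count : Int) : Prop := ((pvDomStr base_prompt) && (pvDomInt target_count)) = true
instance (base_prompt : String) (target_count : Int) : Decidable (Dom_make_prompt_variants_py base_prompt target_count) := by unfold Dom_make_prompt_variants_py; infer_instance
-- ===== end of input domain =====

-- B formats one full 125-prompt cycle once, then tiles it by list repetition and
-- truncates, replacing A's per-index mod/div template arithmetic (objective: alternative).

-- shared template data and the f-string (identical literals in both Pythons)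
def pvIntros : List String := [
  "Please analyze the files below and write the required report.",
  "I need a clean analysis of the two data files in the workspace.",
  "Analyze these workspace data files and produce the requested report.",
  "Please read both files carefully and write a summary report.",
  "Use the provided files to generate the requested markdown summary."]
def pvNudges : List String := [
  "Do not guess spreadsheet contents without reading the workbook structure.",
  "Make sure the Excel workbook is actually parsed before summarizing it.",
  "The workbook has multiple sheets, so inspect it structurally before reporting numbers.",
  "Be careful not to treat the Excel workbook as plain text.",
  "Use the available tools to inspect the real file contents before writing conclusions."]
def pvClosers : List String := [
  "Keep the report concise but correct.",
  "Accuracy matters more than speed.",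
  "Do the real computation before writing `data_summary.md`.",
  "Use the workspace files directly; do not make assumptions.",
  "Write the final report only after the required analysis is complete."]
def pvFmt (intro base_prompt nudge closer : String) : String :=
  intro ++ "\n\n" ++ base_prompt ++ "\n\nNote: " ++ nudge ++ "\n" ++ closer

-- ===== PORT A =====
-- for-loop over range(target_count); indices always in range, so pyGetD's default is never used
def make_prompt_variants_py (base_prompt : String) (target_count : Int) : List String :=
  PySem.List.slice ((PySem.List.pyRange 0 target_count 1).foldl (fun acc i =>
    let intro := PySem.List.pyGetD pvIntros (PySem.Int.mod i (pvIntros.length : Int)) ""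
    let nudge := PySem.List.pyGetD pvNudges
      (PySem.Int.mod (PySem.Int.floordiv i (pvIntros.length : Int)) (pvNudges.length : Int)) ""
    let closer := PySem.List.pyGetD pvClosers
      (PySem.Int.mod (PySem.Int.floordiv i ((pvIntros.length : Int) * (pvNudges.length : Int)))
        (pvClosers.length : Int)) ""
    acc ++ [pvFmt intro base_prompt nudge closer]) []) none (some target_count)

-- ===== PORT B =====
-- block = [f"…" for closer in closers for nudge in nudges for intro in intros]
def pvBlock (base_prompt : String) : List String :=
  pvClosers.flatMap (fun c => pvNudges.flatMap (fun n =>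
    pvIntros.map (fun i => pvFmt i base_prompt n c)))

-- if target_count <= 0: []; reps = -(-target_count // len(block)); (block * reps)[:target_count]
def make_prompt_variants_py_alt (base_prompt : String) (target_count : Int) : List String :=
  let block := pvBlock base_prompt
  if target_count ≤ 0 then []
  else
    let reps := -(PySem.Int.floordiv (-target_count) (block.length : Int))
    PySem.List.slice (List.flatten (List.replicate reps.toNat block)) none (some target_count)

-- ===== PRECONDITION & SPEC =====
def Spec_make_prompt_variants_py (base_prompt : String) (target_count : Int) (out : List String) : Prop := out = make_prompt_variants_py_alt base_prompt target_count
instance (base_prompt : String) (target_count : Int) (out : List String) : Decidable (Spec_make_prompt_variants_py base_prompt target_count out) := by unfold Spec_make_prompt_variants_py; infer_instance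

-- ===== CLAIM =====
def Claim_equal_make_prompt_variants_py : Prop := ∀ (base_prompt : String) (target_count : Int), Dom_make_prompt_variants_py base_prompt target_count → Spec_make_prompt_variants_py base_prompt target_count (make_prompt_variants_py base_prompt target_count)

-- ===== LEMMAS AND PROOFS =====

-- the entry A builds at loop index j (Nat form)
def pvEntry (base_prompt : String) (j : Nat) : String :=
  pvFmt (pvIntros.getD (j % 5) "") base_prompt (pvNudges.getD (j / 5 % 5) "")
    (pvClosers.getD (j / 25 % 5) "")

-- B's block is exactly the first 125 entries
lemma pvBlock_eq (base_prompt : String) :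
    pvBlock base_prompt = (List.range 125).map (pvEntry base_prompt) := rfl

-- tiling the block = cycled entries
lemma pvFlatten_replicate (base_prompt : String) (r : Nat) :
    List.flatten (List.replicate r (pvBlock base_prompt)) =
      (List.range (r * 125)).map (fun j => pvEntry base_prompt (j % 125)) := by
  induction r with
  | zero => simp
  | succ m ih =>
    rw [List.replicate_succ, List.flatten_cons, ih]
    have : (m + 1) * 125 = 125 + m * 125 := by ring
    rw [this, List.range_add, List.map_append, List.map_map, pvBlock_eq]
    congr 1
    all_goals
      apply List.map_congr_left
      intro j hj
      rw [List.mem_range] at hj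
      first
      | rw [Nat.mod_eq_of_lt hj]
      | simp [Function.comp, Nat.add_mod_left]

-- the entry is 125-periodic in the index
lemma pvEntry_mod (base_prompt : String) (j : Nat) :
    pvEntry base_prompt (j % 125) = pvEntry base_prompt j := by
  unfold pvEntry
  have h1 : j % 125 % 5 = j % 5 := by omega
  have h2 : j % 125 / 5 % 5 = j / 5 % 5 := by omega
  have h3 : j % 125 / 25 % 5 = j / 25 % 5 := by omega
  rw [h1, h2, h3]

-- A's loop as a map over range (Nat form)
lemma pvA_eq_map (base_prompt : String) (target_count : Int) :
    make_prompt_variants_py base_prompt target_count =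
      PySem.List.slice ((List.range target_count.toNat).map (pvEntry base_prompt))
        none (some target_count) := by
  unfold make_prompt_variants_py
  rw [PySem.List.pyRange_one, PySem.List.foldl_append_singleton_eq_map]
  congr 1
  rw [Int.sub_zero, List.nil_append, List.map_map]
  apply List.map_congr_left
  intro j _
  have e1 : (pvIntros.length : Int) = ((5:Nat) : Int) := rfl
  have e2 : (pvNudges.length : Int) = ((5:Nat) : Int) := rfl
  have e3 : (pvClosers.length : Int) = ((5:Nat) : Int) := rfl
  have e4 : ((5:Nat):Int) * ((5:Nat):Int) = ((25:Nat):Int) := by norm_num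
  simp only [Function.comp, zero_add, e1, e2, e3, e4, PySem.Int.mod_natCast,
    PySem.Int.floordiv_natCast, PySem.List.pyGetD_natCast]
  rfl

theorem make_prompt_variants_py_spec : Claim_equal_make_prompt_variants_py := by
  intro base_prompt target_count _
  unfold Spec_make_prompt_variants_py make_prompt_variants_py_alt
  rw [pvA_eq_map]
  by_cases h : target_count ≤ 0
  · have : target_count.toNat = 0 := by omega
    simp [h, this, PySem.List.slice]
  · simp only [h, if_false]
    have hlen : ((pvBlock base_prompt).length : Int) = (125 : Int) := by
      rw [pvBlock_eq]; simp
    rw [hlen]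
    set q := -(PySem.Int.floordiv (-target_count) 125) with hq
    have hbr : (q - 1) * 125 < target_count ∧ target_count ≤ q * 125 :=
      (PySem.Int.neg_floordiv_neg_eq_iff_of_pos (by omega)).mp hq.symm
    have hqn : target_count.toNat ≤ q.toNat * 125 := by omega
    have h0 : (0:Int) ≤ target_count := by omega
    rw [pvFlatten_replicate, PySem.List.slice_to _ h0, PySem.List.slice_to _ h0,
      ← List.map_take, ← List.map_take, List.take_range, List.take_range, Nat.min_self,
      Nat.min_eq_left hqn]
    apply List.map_congr_left
    intro j _
    exact (pvEntry_mod base_prompt j).symm
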